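-- pv_equiv track=rewrite | github.com/auggiemarignier/pxmcmc | pxmcmc/utils.py | chebyshev1
-- ===== SOURCE A (Python) =====
-- def chebyshev1(X, order):
--     """
--     Calculates the Chebyshev polynomial of the first kind of the given order at point X.
--     Uses the recurrence relation
--             T_{k+1}(X) = 2XT_{k}(X) - T_{k-1}(X)
--             T_{1}(X) = X
--             T_{0}(X) = 1
--     """
--     if order < 0:
--         raise ValueError("order must be >= 0")
--     elif order == 0:
--         return 1
--     elif order == 1:
--         return X
--     else:
--         return 2 * X * chebyshev1(X, order - 1) - chebyshev1(X, order - 2)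
-- ===== SOURCE B (Python) =====
-- def chebyshev1(X, order):
--     """Iterative bottom-up Chebyshev recurrence, O(order) instead of O(2^order)."""
--     if order < 0:
--         raise ValueError("order must be >= 0")
--     prev, cur = 1, X
--     for _ in range(order):
--         prev, cur = cur, 2 * X * cur - prev
--     return prev
-- ===== Notes on version B (the rewrite author's own statement) =====
-- stated objective: faster
-- what changed: Replaces the naive binary recursion with a bottom-up iterative recurrence keeping only the last two Chebyshev values; intended as asymptotically faster (a timing run saw A time out at order=16 where B returned, but could not verify a clean ratio).
import Mathlib
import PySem

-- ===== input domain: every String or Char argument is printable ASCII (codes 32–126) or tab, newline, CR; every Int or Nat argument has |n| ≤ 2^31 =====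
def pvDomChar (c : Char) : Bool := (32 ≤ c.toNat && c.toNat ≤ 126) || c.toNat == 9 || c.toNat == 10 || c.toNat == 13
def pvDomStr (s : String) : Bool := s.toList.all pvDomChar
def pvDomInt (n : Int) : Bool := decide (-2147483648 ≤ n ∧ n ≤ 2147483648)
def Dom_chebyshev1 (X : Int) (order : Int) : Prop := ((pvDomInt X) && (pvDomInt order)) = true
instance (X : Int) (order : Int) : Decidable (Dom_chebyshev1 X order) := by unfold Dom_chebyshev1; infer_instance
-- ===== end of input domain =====

-- B replaces A's binary recursion by the iterative bottom-up recurrence keeping the last two values (intended as asymptotically faster; a timing run could not verify a ratio because A times out).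

-- ===== PORT A =====
-- A's recursion on the Nat measure of order (A only recurses for order ≥ 2, so this is exact there).
def chebA (X : Int) : Nat → Int
  | 0 => 1
  | 1 => X
  | n + 2 => 2 * X * chebA X (n + 1) - chebA X n

def chebyshev1 (X : Int) (order : Int) : Int :=
  if order < 0 then 0   -- Python raises ValueError here; excluded by Pre_
  else chebA X order.toNat

-- ===== PORT B =====
def chebyshev1_alt (X : Int) (order : Int) : Int :=
  if order < 0 then 0   -- Python raises ValueError here; excluded by Pre_
  else
    ((List.range order.toNat).foldl
      (fun (p : Int × Int) _ => (p.2, 2 * X * p.2 - p.1)) (1, X)).1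

-- ===== PRECONDITION & SPEC =====
-- A raises ValueError for order < 0; those inputs are excluded.
def Pre_chebyshev1 (X : Int) (order : Int) : Prop := 0 ≤ order
instance (X : Int) (order : Int) : Decidable (Pre_chebyshev1 X order) := by unfold Pre_chebyshev1; infer_instance
def pvWitness_chebyshev1 : Int × Int := (3, 4)

def Spec_chebyshev1 (X : Int) (order : Int) (out : Int) : Prop := out = chebyshev1_alt X order
instance (X : Int) (order : Int) (out : Int) : Decidable (Spec_chebyshev1 X order out) := by unfold Spec_chebyshev1; infer_instance

-- ===== CLAIM (what is proved, stated in full; the proofs are below) =====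
def Claim_equal_chebyshev1 : Prop := ∀ (X : Int) (order : Int), Dom_chebyshev1 X order → Pre_chebyshev1 X order → Spec_chebyshev1 X order (chebyshev1 X order)

-- ===== LEMMAS AND PROOFS =====
-- Loop invariant: after n iterations the pair holds (T_n, T_{n+1}).
theorem foldl_cheb (X : Int) (n : Nat) :
    (List.range n).foldl (fun (p : Int × Int) _ => (p.2, 2 * X * p.2 - p.1)) (1, X)
      = (chebA X n, chebA X (n + 1)) := by
  induction n with
  | zero => simp [chebA]
  | succ n ih =>
      rw [List.range_succ, List.foldl_append, ih]
      simp [chebA]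

-- ===== VERDICT (by name: the statement is the Claim_ definition above) =====
theorem chebyshev1_spec : Claim_equal_chebyshev1 := by
  intro X order _ hpre
  unfold Spec_chebyshev1 chebyshev1 chebyshev1_alt
  rw [if_neg (by exact not_lt.mpr hpre), if_neg (by exact not_lt.mpr hpre), foldl_cheb]
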